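-- pv_equiv track=rewrite | github.com/TRPP-IKBO-06/pr2-Mechwv | 1.3.py | func
-- ===== SOURCE A (Python) =====
-- def func(n, m):
--     summ = 0
--     for i in range(1, n+1):
--         for j in range(1, m+1):
--             summ += (i ** 4 + i ** 6 + 90)
--     for i in range(1, n+1):
--         summ += i ** 4 - 20 * i ** 5
--     return summ
-- ===== SOURCE B (Python) =====
-- def func(n, m):
--     total = 0
--     for i in range(1, n + 1):
--         total += max(m, 0) * (i ** 4 + i ** 6 + 90) + i ** 4 - 20 * i ** 5
--     return total
-- ===== Notes on version B (the rewrite author's own statement) =====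
-- stated objective: faster
-- what changed: The inner m-loop (which adds an i-only constant m times) is replaced by a single multiplication by max(m,0), and the two outer i-loops are fused into one pass.
import Mathlib
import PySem

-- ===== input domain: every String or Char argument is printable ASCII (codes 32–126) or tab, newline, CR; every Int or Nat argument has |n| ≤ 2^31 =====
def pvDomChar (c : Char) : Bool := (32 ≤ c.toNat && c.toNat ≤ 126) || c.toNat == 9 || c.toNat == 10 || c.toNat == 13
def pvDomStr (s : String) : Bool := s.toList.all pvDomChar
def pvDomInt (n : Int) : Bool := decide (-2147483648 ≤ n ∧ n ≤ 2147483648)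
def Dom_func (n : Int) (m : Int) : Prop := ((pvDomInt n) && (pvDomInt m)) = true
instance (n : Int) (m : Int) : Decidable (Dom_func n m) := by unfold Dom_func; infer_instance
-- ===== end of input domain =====

-- B replaces the inner m-loop by one multiplication and fuses the two i-loops into one pass: O(n) instead of O(n*m).

-- ===== PORT A =====
def func (n : Int) (m : Int) : Int :=
  let summ : Int := 0
  let summ := (PySem.List.pyRange 1 (n+1) 1).foldl
    (fun summ i => (PySem.List.pyRange 1 (m+1) 1).foldl
      (fun summ _j => summ + (i ^ 4 + i ^ 6 + 90)) summ) summ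
  let summ := (PySem.List.pyRange 1 (n+1) 1).foldl
    (fun summ i => summ + (i ^ 4 - 20 * i ^ 5)) summ
  summ

-- ===== PORT B =====
def func_alt (n : Int) (m : Int) : Int :=
  (PySem.List.pyRange 1 (n+1) 1).foldl
    (fun total i => total + (max m 0 * (i ^ 4 + i ^ 6 + 90) + i ^ 4 - 20 * i ^ 5)) 0

-- ===== PRECONDITION & SPEC =====
def Spec_func (n : Int) (m : Int) (out : Int) : Prop := out = func_alt n m
instance (n : Int) (m : Int) (out : Int) : Decidable (Spec_func n m out) := by unfold Spec_func; infer_instance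

-- ===== CLAIM (what is proved, stated in full; the proofs are below) =====
def Claim_equal_func : Prop := ∀ (n : Int) (m : Int), Dom_func n m → Spec_func n m (func n m)

-- ===== LEMMAS AND PROOFS =====

-- the inner loop of A adds an i-only constant m times
theorem inner_loop_eq (m c s : Int) :
    (PySem.List.pyRange 1 (m+1) 1).foldl (fun summ _ => summ + c) s = s + max m 0 * c := by
  rw [PySem.List.foldl_add (g := fun _ => c)]
  rw [List.map_const', List.sum_replicate, PySem.List.length_pyRange_one]
  have : ((m + 1 - 1).toNat : Int) = max m 0 := by omega
  rw [nsmul_eq_mul, ← this]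

-- ===== VERDICT (by name: the statement is the Claim_ definition above) =====
theorem func_spec : Claim_equal_func := by
  intro n m _
  show func n m = func_alt n m
  unfold func func_alt
  simp only [inner_loop_eq]
  rw [PySem.List.foldl_add (g := fun i => max m 0 * (i ^ 4 + i ^ 6 + 90)),
      PySem.List.foldl_add (g := fun i => i ^ 4 - 20 * i ^ 5),
      PySem.List.foldl_add (g := fun i => max m 0 * (i ^ 4 + i ^ 6 + 90) + i ^ 4 - 20 * i ^ 5)]
  have := PySem.List.sum_map_add_int (xs := PySem.List.pyRange 1 (n+1) 1)
    (f := fun i => max m 0 * (i ^ 4 + i ^ 6 + 90)) (g := fun i => i ^ 4 - 20 * i ^ 5)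
  simp only [show ∀ i : Int, max m 0 * (i ^ 4 + i ^ 6 + 90) + i ^ 4 - 20 * i ^ 5
      = max m 0 * (i ^ 4 + i ^ 6 + 90) + (i ^ 4 - 20 * i ^ 5) from fun i => by ring] at *
  omega
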